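-- pv_equiv track=rewrite | github.com/kenkitts/advent_of_code | day6/d6p2.py | calc_responses
-- ===== SOURCE A (Python) =====
-- def calc_responses(list_data):
--     group_size = len(list_data)
--     count = 0
--     string = ''
--     if group_size == 1:
--         return len(list_data[0])
--     for x in list_data:
--         string += x
--     for x in set(string):
--         if string.count(x) == group_size:
--             count +=1
--     return count
-- ===== SOURCE B (Python) =====
-- def calc_responses(list_data):
--     group_size = len(list_data)
--     if group_size == 1:
--         return len(list_data[0])
--     chars = sorted(''.join(list_data))
--     count = 0
--     i = 0
--     n = len(chars)
--     while i < n: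
--         j = i + 1
--         while j < n and chars[j] == chars[i]:
--             j += 1
--         if j - i == group_size:
--             count += 1
--         i = j
--     return count
-- ===== Notes on version B (the rewrite author's own statement) =====
-- stated objective: alternative
-- what changed: A rescans the whole concatenation with string.count once per distinct character; B sorts the concatenated characters once and counts maximal runs whose length equals the group size in a single scan.
import Mathlib
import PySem

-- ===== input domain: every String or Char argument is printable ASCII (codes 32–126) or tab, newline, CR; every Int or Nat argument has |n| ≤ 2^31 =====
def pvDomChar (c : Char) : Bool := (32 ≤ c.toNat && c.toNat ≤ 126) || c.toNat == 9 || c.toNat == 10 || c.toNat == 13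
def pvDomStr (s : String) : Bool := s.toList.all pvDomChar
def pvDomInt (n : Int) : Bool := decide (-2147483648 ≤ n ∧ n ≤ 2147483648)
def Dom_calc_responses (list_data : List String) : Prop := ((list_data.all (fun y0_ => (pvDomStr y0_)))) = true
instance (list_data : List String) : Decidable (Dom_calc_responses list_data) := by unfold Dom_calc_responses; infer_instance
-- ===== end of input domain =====

-- B replaces A's per-distinct-character rescans of the concatenation (string.count) with one
-- sort of the concatenated characters followed by a single scan over maximal runs of equal
-- characters; objective: alternative (a different algorithm of similar cost).

-- ===== PORT A =====
-- A: concatenate, then for each x in set(string) test string.count(x) == group_size.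
def calc_responses (list_data : List String) : Int :=
  let group_size := list_data.length
  let count : Int := 0
  if group_size == 1 then
    PySem.Str.len (PySem.List.pyGetD list_data 0 "")
  else
    let string : List Char := list_data.foldl (fun s x => s ++ x.toList) []
    (PySem.Set.ofList string).foldl
      (fun acc x => if string.count x == group_size then acc + 1 else acc) count

-- ===== PORT B =====
-- B's outer/inner while loops: split off the maximal run of the leading character
-- (inner while = takeWhile/dropWhile over the rest), add 1 when the run length is n.
def runScan (n : Nat) : List Char → Int
  | [] => 0
  | c :: rest =>
      (if (rest.takeWhile (fun x => x == c)).length + 1 == n then (1 : Int) else 0)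
        + runScan n (rest.dropWhile (fun x => x == c))
termination_by l => l.length
decreasing_by
  have := List.length_dropWhile_le (fun x => x == c) rest
  simp only [List.length_cons]; omega

def calc_responses_alt (list_data : List String) : Int :=
  let group_size := list_data.length
  if group_size == 1 then
    PySem.Str.len (PySem.List.pyGetD list_data 0 "")
  else
    let chars := PySem.List.sorted (list_data.flatMap String.toList) (fun x => x) false
    runScan group_size chars

-- ===== PRECONDITION & SPEC =====
def Spec_calc_responses (list_data : List String) (out : Int) : Prop := out = calc_responses_alt list_data
instance (list_data : List String) (out : Int) : Decidable (Spec_calc_responses list_data out) := by unfold Spec_calc_responses; infer_instance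

-- ===== CLAIM (what is proved, stated in full; the proofs are below) =====
def Claim_equal_calc_responses : Prop := ∀ (list_data : List String), Dom_calc_responses list_data → Spec_calc_responses list_data (calc_responses list_data)

-- ===== LEMMAS AND PROOFS =====

-- order-free common value: the number of characters occurring exactly n times in l
def nExact (l : List Char) (n : Nat) : Nat :=
  (l.toFinset.filter (fun c => l.count c = n)).card

lemma nExact_run (c : Char) (A T : List Char) (hA : ∀ a ∈ A, a = c) (hT : c ∉ T) (n : Nat) :
    nExact (c :: (A ++ T)) n
      = (if A.length + 1 = n then 1 else 0) + nExact T n := by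
  have hcntc : (c :: (A ++ T)).count c = A.length + 1 := by
    have h1 : A.count c = A.length := List.count_eq_length.mpr (by
      intro a ha; exact ((hA a ha).symm ▸ rfl))
    have h2 : T.count c = 0 := List.count_eq_zero.mpr hT
    simp only [List.count_cons_self, List.count_append, h1, h2]
  have hcntx : ∀ x ∈ T, (c :: (A ++ T)).count x = T.count x := by
    intro x hx
    have hxc : x ≠ c := fun h => hT (h ▸ hx)
    have hxA : A.count x = 0 := List.count_eq_zero.mpr (fun hmem => hxc (hA x hmem))
    simp [List.count_append, hxA, Ne.symm hxc]
  have hfin : (c :: (A ++ T)).toFinset = insert c T.toFinset := by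
    ext x
    simp only [List.mem_toFinset, List.mem_cons, List.mem_append, Finset.mem_insert]
    constructor
    · rintro (h | h | h)
      · exact Or.inl h
      · exact Or.inl (hA x h)
      · exact Or.inr (by simpa using h)
    · rintro (h | h)
      · exact Or.inl h
      · exact Or.inr (Or.inr (by simpa using h))
  have hfilT : T.toFinset.filter (fun x => (c :: (A ++ T)).count x = n)
      = T.toFinset.filter (fun x => T.count x = n) := by
    apply Finset.filter_congr
    intro x hx
    simp only [List.mem_toFinset] at hx
    simp [hcntx x hx]
  have hcT : c ∉ T.toFinset.filter (fun x => T.count x = n) := by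
    simp [List.mem_toFinset]; intro h; exact absurd h hT
  unfold nExact
  rw [hfin, Finset.filter_insert]
  by_cases hc : A.length + 1 = n
  · rw [if_pos (by rw [hcntc]; exact hc), hfilT, if_pos hc,
      Finset.card_insert_of_notMem hcT]
    omega
  · rw [if_neg (by rw [hcntc]; exact hc), hfilT, if_neg hc, Nat.zero_add]

lemma runScan_eq_nExact (n : Nat) (l : List Char) (h : l.Pairwise (· ≤ ·)) :
    runScan n l = (nExact l n : Int) := by
  induction hl : l.length using Nat.strong_induction_on generalizing l with
  | _ k ih =>
    match l, h with
    | [], _ => simp [runScan, nExact]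
    | c :: rest, h =>
      set A := rest.takeWhile (fun x => x == c) with hAdef
      set T := rest.dropWhile (fun x => x == c) with hTdef
      have hrest : A ++ T = rest := List.takeWhile_append_dropWhile
      have hA : ∀ a ∈ A, a = c := by
        intro a ha
        have := List.mem_takeWhile_imp ha
        simpa using this
      have hcle : ∀ y ∈ rest, c ≤ y := (List.pairwise_cons.mp h).1
      have hTsub : T.Sublist rest := List.dropWhile_sublist _
      have hTpair : T.Pairwise (· ≤ ·) :=
        ((List.pairwise_cons.mp h).2).sublist hTsub
      have hT : c ∉ T := by
        cases hTcase : T with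
        | nil => simp
        | cons x T' =>
          have hxne : ¬ (x == c) = true := by
            have := List.head?_dropWhile_not (fun x => x == c) rest
            rw [← hTdef, hTcase] at this; simpa using this
          have hxc : c < x := by
            have hxmem : x ∈ rest := hTsub.mem (hTcase ▸ List.mem_cons_self)
            exact lt_of_le_of_ne (hcle x hxmem) (fun h' => hxne (by simp [h'.symm]))
          intro hmem
          rcases List.mem_cons.mp hmem with h' | h'
          · exact absurd h' (ne_of_lt hxc)
          · have : x ≤ c := ((List.pairwise_cons.mp (hTcase ▸ hTpair)).1) c h'
            exact absurd hxc (not_lt.mpr this)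
      have hTlen : T.length < k := by
        have h1 : T.length ≤ rest.length := hTsub.length_le
        simp only [List.length_cons] at hl; omega
      have ihT := ih T.length hTlen T hTpair rfl
      rw [runScan, ihT]
      have hsplit : c :: rest = c :: (A ++ T) := by rw [hrest]
      rw [hsplit, nExact_run c A T hA hT n]
      by_cases hc : A.length + 1 = n
      · simp [← hAdef, hc]
      · simp [← hAdef, hc]

lemma nExact_perm {l l' : List Char} (hp : l.Perm l') (n : Nat) :
    nExact l n = nExact l' n := by
  unfold nExact
  rw [List.toFinset_eq_of_perm l l' hp]
  apply congrArg
  apply Finset.filter_congr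
  intro x _
  simp [hp.count_eq]

lemma setCount_eq_nExact (cs : List Char) (n : Nat) :
    ((PySem.Set.ofList cs).countP (fun x => cs.count x == n) : Int) = (nExact cs n : Int) := by
  have hnd : (PySem.Set.ofList cs).Nodup := by
    rw [← PySem.List.dedup_eq_ofList]; exact PySem.List.nodup_dedup cs
  have hmem : ∀ x, x ∈ PySem.Set.ofList cs ↔ x ∈ cs := by
    intro x; rw [← PySem.List.dedup_eq_ofList]; simp
  congr 1
  unfold nExact
  rw [List.countP_eq_length_filter]
  have hn2 : ((PySem.Set.ofList cs).filter (fun x => cs.count x == n)).Nodup :=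
    hnd.filter _
  rw [← List.toFinset_card_of_nodup hn2, List.toFinset_filter]
  apply congrArg
  ext x
  simp [hmem x]

theorem calc_responses_spec : Claim_equal_calc_responses := by
  intro list_data _
  unfold Spec_calc_responses calc_responses calc_responses_alt
  by_cases h1 : list_data.length == 1
  · simp [h1]
  · simp only [h1, Bool.false_eq_true, if_false]
    have hs : list_data.foldl (fun s x => s ++ x.toList) ([] : List Char)
        = list_data.flatMap String.toList := by
      simpa using PySem.List.foldl_append_eq_flatMap (g := String.toList) (l := list_data) (acc := [])
    rw [hs]
    set cs := list_data.flatMap String.toList with hcs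
    set ss := PySem.List.sorted cs (fun x => x) false with hss
    have hperm : ss.Perm cs := PySem.List.sorted_perm cs (fun x => x) false
    have hpair : ss.Pairwise (· ≤ ·) := by
      simpa using PySem.List.sorted_pairwise cs (fun x => x)
    rw [PySem.List.foldl_if_add_one (p := fun x => cs.count x == list_data.length)
      (l := PySem.Set.ofList cs) (a := 0), zero_add,
      setCount_eq_nExact cs list_data.length,
      runScan_eq_nExact list_data.length ss hpair,
      nExact_perm hperm]
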